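-- pv_equiv track=rewrite | github.com/GPlaczek/wd_helpers | votes.py | baldwin
-- ===== SOURCE A (Python) =====
-- def scores(lineups, variants):
--     __votes = {i: [0 for i in variants] for i in variants}
--     for (order, number) in lineups.items():
--         positions = order.split()
--         n = 0
--         for pos in positions:
--             if pos not in variants: continue
--             __votes[pos][n] += number
--             n+=1
--     return __votes
--
-- def positional(votes, vals):
--     scores = {i: 0 for i in votes}
--     for (k, v) in votes.items():
--         scores[k] = sum(x*y for (x, y) in zip(v, vals))
--     return scores
--
-- def borda(votes):
--     __len = len(votes.get(next(iter(votes))))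
--     vals = [i for i in range(__len)[::-1]]
--     return positional(votes, vals)
--
-- def baldwin(lineups, variants):
--     __variants = variants.copy()
--     ranking = []
--     for _ in range(len(lineups.keys()) - 1):
--         borda_scores = borda(scores(lineups, __variants))
--         ranking.append(min(borda_scores, key=borda_scores.get))
--         __variants.remove(ranking[-1])
--     ranking.append(__variants[0])
--     return ranking[::-1]
-- ===== SOURCE B (Python) =====
-- def baldwin(lineups, variants):
--     # Parse each ballot once; each round accumulate Borda scores directly in one pass
--     # (weight = survivors_count - 1 - rank), instead of building the per-position vote
--     # matrix and dot-producting it with a descending weight vector every round.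
--     ballots = [(order.split(), number) for (order, number) in lineups.items()]
--     survivors = list(variants)
--     result = []
--     for _ in range(len(lineups) - 1):
--         m = len(survivors)
--         score = dict.fromkeys(survivors, 0)
--         for (toks, number) in ballots:
--             rank = 0
--             for t in toks:
--                 if t in score:
--                     score[t] += number * (m - 1 - rank)
--                     rank += 1
--         worst = min(score, key=score.get)
--         result = [worst] + result
--         survivors.remove(worst)
--     return [survivors[0]] + result
-- ===== Notes on version B (the rewrite author's own statement) =====
-- stated objective: faster
-- what changed: Each round B accumulates every candidate's Borda score directly in one pass over the once-parsed ballots (adding count*(survivors-1-rank) as it walks a ballot), instead of A's pipeline that rebuilds a V x V position-indexed vote matrix from re-split ballots and dot-products each row with a descending weight vector every round; B also builds the ranking back-to-front instead of reversing at the end.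
import Mathlib
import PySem

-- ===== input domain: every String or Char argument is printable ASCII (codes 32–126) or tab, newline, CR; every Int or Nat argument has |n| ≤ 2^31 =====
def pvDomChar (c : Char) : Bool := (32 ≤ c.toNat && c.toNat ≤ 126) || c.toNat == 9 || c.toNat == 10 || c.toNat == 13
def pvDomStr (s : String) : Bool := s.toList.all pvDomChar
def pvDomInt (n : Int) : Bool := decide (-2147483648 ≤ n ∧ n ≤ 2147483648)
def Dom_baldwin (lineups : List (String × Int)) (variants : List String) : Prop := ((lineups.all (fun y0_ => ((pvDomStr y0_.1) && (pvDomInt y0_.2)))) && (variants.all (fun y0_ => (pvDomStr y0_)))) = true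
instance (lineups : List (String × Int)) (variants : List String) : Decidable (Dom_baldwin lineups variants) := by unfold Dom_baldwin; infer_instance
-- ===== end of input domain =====

-- B replaces A's per-round position-indexed vote matrix + descending-weight dot product by a
-- single accumulation pass over once-parsed ballots (objective: faster, measured by the timing
-- run; equivalence is about the return value only).

-- ===== PORT A =====
def pvIncAt (v : List Int) (n : Nat) (w : Int) : List Int :=
  if n < v.length then v.set n (v.getD n 0 + w) else v

def pvScores (items : List (String × Int)) (variants : List String) :
    PySem.Dict String (List Int) :=
  let votes0 := variants.foldl
    (fun d i => d.insert i (variants.map (fun _ => (0 : Int)))) PySem.Dict.empty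
  items.foldl (fun votes p =>
    ((PySem.Str.split₀ p.1).foldl
      (fun (st : PySem.Dict String (List Int) × Nat) pos =>
        if pos ∈ variants then (st.1.modify pos [] (fun v => pvIncAt v st.2 p.2), st.2 + 1)
        else st)
      (votes, 0)).1) votes0

def pvDot (v vals : List Int) : Int := ((v.zip vals).map (fun q => q.1 * q.2)).sum

def pvPositional (votes : PySem.Dict String (List Int)) (vals : List Int) :
    PySem.Dict String Int :=
  let s0 := votes.keys.foldl (fun d k => d.insert k (0 : Int)) PySem.Dict.empty
  votes.items.foldl (fun d q => d.insert q.1 (pvDot q.2 vals)) s0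

def pvBorda (votes : PySem.Dict String (List Int)) : PySem.Dict String Int :=
  let len : Nat := match votes.items.head? with | some q => q.2.length | none => 0
  let vals := (PySem.List.slice? (PySem.List.pyRange 0 (len : Int) 1) none none (-1)).getD []
  pvPositional votes vals

def baldwin (lineups : List (String × Int)) (variants : List String) : List String :=
  let d := PySem.Dict.ofList lineups
  let st := (PySem.List.pyRange 0 ((d.size : Int) - 1) 1).foldl
    (fun (st : List String × List String) _ =>
      let bs := pvBorda (pvScores d.items st.2)
      match PySem.List.min? bs.keys (fun k => bs.getD k 0) with
      | some m => (st.1 ++ [m], (PySem.List.remove? st.2 m).getD st.2)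
      | none => st)
    ([], variants)
  match st.2.head? with
  | some v => (st.1 ++ [v]).reverse
  | none => st.1.reverse

-- ===== PORT B =====
def pvRoundScore (ballots : List (List String × Int)) (survivors : List String) :
    PySem.Dict String Int :=
  let m := survivors.length
  let s0 := survivors.foldl (fun d c => d.insert c (0 : Int)) PySem.Dict.empty
  ballots.foldl (fun sc b =>
    (b.1.foldl
      (fun (st : PySem.Dict String Int × Nat) t =>
        if st.1.contains t then
          (st.1.modify t 0 (fun x => x + b.2 * ((m : Int) - 1 - (st.2 : Int))), st.2 + 1)
        else st)
      (sc, 0)).1) s0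

def baldwin_alt (lineups : List (String × Int)) (variants : List String) : List String :=
  let d := PySem.Dict.ofList lineups
  let ballots := d.items.map (fun p => (PySem.Str.split₀ p.1, p.2))
  let st := (PySem.List.pyRange 0 ((d.size : Int) - 1) 1).foldl
    (fun (st : List String × List String) _ =>
      let sc := pvRoundScore ballots st.2
      match PySem.List.min? sc.keys (fun k => sc.getD k 0) with
      | some w => (w :: st.1, (PySem.List.remove? st.2 w).getD st.2)
      | none => st)
    ([], variants)
  match PySem.List.pyGet? st.2 0 with
  | some v => v :: st.1
  | none => st.1

-- ===== PRECONDITION & SPEC =====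
def pvFilt (variants : List String) (s : String) : List String :=
  (PySem.Str.split₀ s).filter (fun t => decide (t ∈ variants))

-- Pre_ excludes exactly the inputs on which the Python A raises — empty variants, or more
-- distinct ballots than variants (the survivor list runs out: StopIteration/IndexError), or a
-- ballot repeating surviving variants often enough to overrun A's position-indexed vote vectors
-- (IndexError) — plus, because the repeat bound is checked per ballot rather than per elimination
-- round, a few repeat-carrying inputs on which A still returns (and B returns the same value).
def Pre_baldwin (lineups : List (String × Int)) (variants : List String) : Prop :=
  variants ≠ [] ∧
  (PySem.Set.ofList (lineups.map Prod.fst)).length ≤ variants.length ∧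
  ∀ p ∈ lineups,
    (PySem.Set.ofList (lineups.map Prod.fst)).length ≤ 1 ∨
    (pvFilt variants p.1).Nodup ∨
    (pvFilt variants p.1).length + (PySem.Set.ofList (lineups.map Prod.fst)).length
      ≤ variants.length + 2

instance (lineups : List (String × Int)) (variants : List String) :
    Decidable (Pre_baldwin lineups variants) := by unfold Pre_baldwin; infer_instance

def pvWitness_baldwin : (List (String × Int)) × List String :=
  ([("a b", 2), ("b a", 1)], ["a", "b"])

def Spec_baldwin (lineups : List (String × Int)) (variants : List String) (out : List String) :
    Prop := out = baldwin_alt lineups variants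
instance (lineups : List (String × Int)) (variants : List String) (out : List String) :
    Decidable (Spec_baldwin lineups variants out) := by unfold Spec_baldwin; infer_instance

-- ===== CLAIM (what is proved, stated in full; the proofs are below) =====
def Claim_equal_baldwin : Prop := ∀ (lineups : List (String × Int)) (variants : List String), Dom_baldwin lineups variants → Pre_baldwin lineups variants → Spec_baldwin lineups variants (baldwin lineups variants)

-- ===== LEMMAS AND PROOFS =====
theorem pv_get?_fold_const {ν : Type} (S : List String) (c : ν) (d : PySem.Dict String ν)
    (k : String) :
    ((S.foldl (fun d i => d.insert i c) d).get? k) = if k ∈ S then some c else d.get? k := by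
  induction S generalizing d with
  | nil => simp
  | cons h t ih =>
    simp only [List.foldl_cons, ih, List.mem_cons]
    by_cases ht : k ∈ t
    · simp [ht]
    · simp only [ht, or_false, PySem.Dict.get?_insert]
      by_cases hk : k = h <;> simp [hk]

def pvVals (m : Nat) : List Int :=
  (PySem.List.slice? (PySem.List.pyRange 0 (m : Int) 1) none none (-1)).getD []

theorem pvVals_eq (m : Nat) : pvVals m = (List.map (fun k : Nat => (↑k : Int)) (List.range m)).reverse := by
  rw [pvVals, PySem.List.pyRange_zero_natCast, PySem.List.slice?_none_none_neg_one]
  rfl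

theorem pvVals_getD (m n : Nat) (h : n < m) :
    (pvVals m).getD n 0 = (m : Int) - 1 - (n : Int) := by
  rw [pvVals_eq, List.getD_eq_getElem?_getD]
  rw [List.getElem?_eq_getElem (by simpa using h), List.getElem_reverse]
  simp only [List.length_map, List.length_range, List.getElem_map, List.getElem_range,
    Option.getD_some]
  omega

theorem pvDot_zero (n : Nat) (vals : List Int) :
    pvDot (List.replicate n 0) vals = 0 := by
  induction n generalizing vals with
  | zero => simp [pvDot]
  | succ k ih =>
    cases vals with
    | nil => simp [pvDot]
    | cons y ys => simpa [pvDot, List.replicate_succ] using ih ys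

theorem pvDot_set (v vals : List Int) (n : Nat) (w : Int) (h : n < v.length) :
    pvDot (v.set n (v.getD n 0 + w)) vals = pvDot v vals + w * vals.getD n 0 := by
  induction n generalizing v vals with
  | zero =>
    cases v with
    | nil => simp at h
    | cons x xs =>
      cases vals with
      | nil => simp [pvDot]
      | cons y ys => simp [pvDot]; ring
  | succ n ih =>
    cases v with
    | nil => simp at h
    | cons x xs =>
      cases vals with
      | nil => simp [pvDot]
      | cons y ys =>
        simp only [List.set_cons_succ, pvDot, List.zip_cons_cons, List.map_cons, List.sum_cons,
          List.getD_cons_succ]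
        have := ih xs ys (by simpa using h)
        simp only [pvDot] at this
        rw [this]; ring

def pvRel (S : List String) (d : PySem.Dict String (List Int)) (e : PySem.Dict String Int) :
    Prop :=
  d.keys = PySem.Set.ofList S ∧ e.keys = PySem.Set.ofList S ∧
  (∀ k ∈ S, (d.getD k []).length = S.length) ∧
  (∀ k, e.getD k 0 = pvDot (d.getD k []) (pvVals S.length))

theorem pv_rel_init (S : List String) :
    pvRel S
      (S.foldl (fun d i => d.insert i (S.map (fun _ => (0 : Int)))) PySem.Dict.empty)
      (S.foldl (fun d c => d.insert c (0 : Int)) PySem.Dict.empty) := by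
  have hA := fun k => pv_get?_fold_const S (S.map (fun _ => (0 : Int))) PySem.Dict.empty k
  have hB := fun k => pv_get?_fold_const S (0 : Int) PySem.Dict.empty k
  have hkA : (S.foldl (fun d i => d.insert i (S.map (fun _ => (0 : Int)))) PySem.Dict.empty).keys
      = PySem.Set.ofList S := by
    rw [PySem.Dict.keys_foldl_insert S (fun _ _ => S.map (fun _ => (0:Int)))]
    simp [PySem.Set.update_nil_left]
  have hkB : (S.foldl (fun d c => d.insert c (0:Int)) PySem.Dict.empty).keys
      = PySem.Set.ofList S := by
    rw [PySem.Dict.keys_foldl_insert S (fun _ _ => (0:Int))]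
    simp [PySem.Set.update_nil_left]
  refine ⟨hkA, hkB, ?_, ?_⟩
  · intro k hk
    simp only [PySem.Dict.getD]
    rw [hA k, if_pos hk]
    simp
  · intro k
    simp only [PySem.Dict.getD]
    rw [hA k, hB k]
    by_cases hk : k ∈ S
    · rw [if_pos hk, if_pos hk]
      simp [pvDot_zero]
    · rw [if_neg hk, if_neg hk]
      simp [pvDot, PySem.Dict.get?_empty]

theorem pv_get?_fold_insert {μ ν : Type} (l : List (String × μ)) (g : String × μ → ν)
    (d : PySem.Dict String ν) (k : String) (hk : k ∉ l.map Prod.fst) :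
    ((l.foldl (fun d q => d.insert q.1 (g q)) d).get? k) = d.get? k := by
  induction l generalizing d with
  | nil => rfl
  | cons q l ih =>
    simp only [List.map_cons, List.mem_cons, not_or] at hk
    simp only [List.foldl_cons, ih _ hk.2, PySem.Dict.get?_insert, if_neg hk.1]

theorem pv_get?_fold_insert_mem {μ ν : Type} (l : List (String × μ)) (g : String × μ → ν)
    (d : PySem.Dict String ν) (k : String) (v : μ) (hnd : (l.map Prod.fst).Nodup)
    (hk : (k, v) ∈ l) :
    ((l.foldl (fun d q => d.insert q.1 (g q)) d).get? k) = some (g (k, v)) := by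
  induction l generalizing d with
  | nil => simp at hk
  | cons q l ih =>
    simp only [List.map_cons, List.nodup_cons] at hnd
    rcases List.mem_cons.1 hk with h | h
    · subst h
      rw [List.foldl_cons, pv_get?_fold_insert l g _ k hnd.1, PySem.Dict.get?_insert]
      simp
    · rw [List.foldl_cons]
      exact ih _ hnd.2 h

theorem pv_ballot_step (S : List String) (w : Int) (toks : List String) :
    ∀ (n : Nat) (d : PySem.Dict String (List Int)) (e : PySem.Dict String Int),
    pvRel S d e →
    (toks.filter (fun t => decide (t ∈ S))).length + n ≤ S.length →
    pvRel S
      (toks.foldl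
        (fun (st : PySem.Dict String (List Int) × Nat) pos =>
          if pos ∈ S then (st.1.modify pos [] (fun v => pvIncAt v st.2 w), st.2 + 1) else st)
        (d, n)).1
      (toks.foldl
        (fun (st : PySem.Dict String Int × Nat) t =>
          if st.1.contains t then
            (st.1.modify t 0 (fun x => x + w * ((S.length : Int) - 1 - (st.2 : Int))), st.2 + 1)
          else st)
        (e, n)).1 := by
  induction toks with
  | nil => intro n d e hrel _; exact hrel
  | cons t ts ih =>
    intro n d e hrel hlen
    obtain ⟨hkd, hke, hvlen, hdot⟩ := hrel
    have hcont : e.contains t = true ↔ t ∈ S := by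
      rw [PySem.Dict.contains_iff_mem_keys, hke, PySem.Set.mem_ofList]
    by_cases hts : t ∈ S
    · have hc : e.contains t = true := hcont.2 hts
      rw [List.foldl_cons, List.foldl_cons, if_pos hts]
      simp only [hc, if_true]
      have hflt : (List.filter (fun t => decide (t ∈ S)) (t :: ts)).length
          = (List.filter (fun t => decide (t ∈ S)) ts).length + 1 := by
        simp [hts]
      have hnm : n < S.length := by omega
      have hvt : (d.getD t []).length = S.length := hvlen t hts
      have htk : t ∈ d.keys := by rw [hkd, PySem.Set.mem_ofList]; exact hts
      have hck : d.contains t = true := (PySem.Dict.contains_iff_mem_keys d t).2 htk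
      have hkd' : (d.modify t [] (fun v => pvIncAt v n w)).keys = PySem.Set.ofList S := by
        rw [PySem.Dict.keys_modify, PySem.Dict.keys_insert_of_contains _ _ hck, hkd]
      have htke : t ∈ e.keys := by rw [hke, PySem.Set.mem_ofList]; exact hts
      have hke' : (e.modify t 0 (fun x => x + w * ((S.length : Int) - 1 - (n : Int)))).keys
          = PySem.Set.ofList S := by
        rw [PySem.Dict.keys_modify, PySem.Dict.keys_insert_of_contains _ _ hc, hke]
      refine ih (n + 1) _ _ ⟨hkd', hke', ?_, ?_⟩ (by omega)
      · intro k hk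
        rw [PySem.Dict.getD_modify]
        by_cases hkt : k = t
        · rw [if_pos hkt, pvIncAt, if_pos (by rw [hvt]; exact hnm)]
          simp [hvt]
        · rw [if_neg hkt]; exact hvlen k hk
      · intro k
        rw [PySem.Dict.getD_modify, PySem.Dict.getD_modify]
        by_cases hkt : k = t
        · rw [if_pos hkt, if_pos hkt, hdot t, pvIncAt, if_pos (by rw [hvt]; exact hnm),
            pvDot_set _ _ _ _ (by rw [hvt]; exact hnm), pvVals_getD S.length n hnm]
        · rw [if_neg hkt, if_neg hkt]; exact hdot k
    · have hc : e.contains t = false := by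
        rw [Bool.eq_false_iff]; exact fun hcc => hts (hcont.1 hcc)
      rw [List.foldl_cons, List.foldl_cons, if_neg hts]
      simp only [hc, Bool.false_eq_true, if_false]
      refine ih n d e ⟨hkd, hke, hvlen, hdot⟩ ?_
      have : (List.filter (fun t => decide (t ∈ S)) (t :: ts)).length
          = (List.filter (fun t => decide (t ∈ S)) ts).length := by
        simp [hts]
      omega

theorem pv_rel_fold (S : List String) (items : List (String × Int))
    (d : PySem.Dict String (List Int)) (e : PySem.Dict String Int)
    (hrel : pvRel S d e)
    (hb : ∀ p ∈ items,
      ((PySem.Str.split₀ p.1).filter (fun t => decide (t ∈ S))).length ≤ S.length) :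
    pvRel S
      (items.foldl (fun votes p =>
        ((PySem.Str.split₀ p.1).foldl
          (fun (st : PySem.Dict String (List Int) × Nat) pos =>
            if pos ∈ S then (st.1.modify pos [] (fun v => pvIncAt v st.2 p.2), st.2 + 1) else st)
          (votes, 0)).1) d)
      ((items.map (fun p => (PySem.Str.split₀ p.1, p.2))).foldl (fun sc b =>
        (b.1.foldl
          (fun (st : PySem.Dict String Int × Nat) t =>
            if st.1.contains t then
              (st.1.modify t 0 (fun x => x + b.2 * ((S.length : Int) - 1 - (st.2 : Int))), st.2 + 1)
            else st)
          (sc, 0)).1) e) := by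
  rw [List.foldl_map]
  induction items generalizing d e with
  | nil => exact hrel
  | cons p items ih =>
    rw [List.foldl_cons, List.foldl_cons]
    exact ih _ _
      (pv_ballot_step S p.2 (PySem.Str.split₀ p.1) 0 d e hrel
        (by simpa using hb p (List.mem_cons_self)))
      (fun q hq => hb q (List.mem_cons_of_mem _ hq))

theorem pv_rel_scores (S : List String) (items : List (String × Int))
    (hb : ∀ p ∈ items,
      ((PySem.Str.split₀ p.1).filter (fun t => decide (t ∈ S))).length ≤ S.length) :
    pvRel S (pvScores items S)
      (pvRoundScore (items.map (fun p => (PySem.Str.split₀ p.1, p.2))) S) := by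
  unfold pvScores pvRoundScore
  exact pv_rel_fold S items _ _ (pv_rel_init S) hb

theorem pv_keys_roundScore (S : List String) (items : List (String × Int))
    (hb : ∀ p ∈ items,
      ((PySem.Str.split₀ p.1).filter (fun t => decide (t ∈ S))).length ≤ S.length) :
    (pvRoundScore (items.map (fun p => (PySem.Str.split₀ p.1, p.2))) S).keys
      = PySem.Set.ofList S :=
  (pv_rel_scores S items hb).2.1

theorem pv_round_eq (S : List String) (items : List (String × Int))
    (hb : ∀ p ∈ items,
      ((PySem.Str.split₀ p.1).filter (fun t => decide (t ∈ S))).length ≤ S.length) :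
    pvBorda (pvScores items S) =
      pvRoundScore (items.map (fun p => (PySem.Str.split₀ p.1, p.2))) S := by
  obtain ⟨hkd, hke, hvlen, hdot⟩ := pv_rel_scores S items hb
  set votes := pvScores items S with hv
  set e := pvRoundScore (items.map (fun p => (PySem.Str.split₀ p.1, p.2))) S with hee
  have hkeysdef : votes.keys = votes.items.map Prod.fst := rfl
  have hnde : e.keys.Nodup := by rw [hke]; exact PySem.Set.nodup_ofList S
  have hndv : votes.keys.Nodup := by rw [hkd]; exact PySem.Set.nodup_ofList S
  cases S with
  | nil =>
    have hvi : votes.items = [] := by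
      have h1 : votes.items.map Prod.fst = [] := by
        rw [← hkeysdef, hkd]; rfl
      exact List.map_eq_nil_iff.1 h1
    have hei : e.items = [] := by
      have h1 : e.items.map Prod.fst = [] := by
        rw [show e.items.map Prod.fst = e.keys from rfl, hke]; rfl
      exact List.map_eq_nil_iff.1 h1
    apply PySem.Dict.ext
    rw [hei]
    show (pvPositional votes _).items = []
    unfold pvPositional
    rw [hvi, List.foldl_nil, show votes.keys = votes.items.map Prod.fst from rfl, hvi]
    rfl
  | cons x S' =>
    have hxs : x ∈ PySem.Set.ofList (x :: S') := (PySem.Set.mem_ofList _ _).2 List.mem_cons_self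
    have hkne : votes.keys ≠ [] := by rw [hkd]; exact List.ne_nil_of_mem hxs
    have hine : votes.items ≠ [] := fun h => hkne (by rw [hkeysdef, h]; rfl)
    obtain ⟨q, rest, hqi⟩ := List.exists_cons_of_ne_nil hine
    have hq2 : votes.items.head? = some q := by rw [hqi]; rfl
    have hqmem : q ∈ votes.items := by rw [hqi]; exact List.mem_cons_self
    have hq1S : q.1 ∈ (x :: S') := by
      have h := PySem.Dict.mem_keys_of_mem_items votes hqmem
      rwa [hkd, PySem.Set.mem_ofList] at h
    have hget : votes.get? q.1 = some q.2 :=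
      PySem.Dict.get?_of_mem_items votes (by rw [Prod.mk.eta]; exact hqmem) hndv
    have hlenq : q.2.length = (x :: S').length := by
      have h := hvlen q.1 hq1S
      rwa [PySem.Dict.getD, hget, Option.getD_some] at h
    have hb1 : pvBorda votes = pvPositional votes (pvVals (x :: S').length) := by
      unfold pvBorda
      simp only [hq2, hlenq]
      rfl
    rw [hb1]
    -- keys of the positional dict
    have hs0keys : (votes.keys.foldl (fun d k => d.insert k (0 : Int)) PySem.Dict.empty).keys
        = PySem.Set.ofList (x :: S') := by
      rw [PySem.Dict.keys_foldl_insert votes.keys (fun _ _ => (0:Int)) PySem.Dict.empty]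
      rw [show (PySem.Dict.empty : PySem.Dict String Int).keys = [] from rfl,
        PySem.Set.update_nil_left, hkd, PySem.Set.ofList_ofList]
    have hkeysP : (pvPositional votes (pvVals (x :: S').length)).keys
        = PySem.Set.ofList (x :: S') := by
      unfold pvPositional
      rw [PySem.Dict.keys_foldl_insert_key votes.items Prod.fst
        (fun _ q => pvDot q.2 (pvVals (x :: S').length)), hs0keys, ← hkeysdef, hkd,
        PySem.Set.update_eq_append_filter, PySem.Set.ofList_ofList]
      have hfil : (PySem.Set.ofList (x :: S')).filter
          (fun y => !(PySem.Set.ofList (x :: S')).contains y) = [] := by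
        rw [List.filter_eq_nil_iff]
        intro y hy
        have hc : List.contains (PySem.Set.ofList (x :: S')) y = true := by
          simpa [List.contains_iff_mem] using hy
        simp only [PySem.Set.contains_eq_listContains, hc, Bool.not_true]
        simp
      rw [hfil, List.append_nil]
    have hndP : (pvPositional votes (pvVals (x :: S').length)).keys.Nodup := by
      rw [hkeysP]; exact PySem.Set.nodup_ofList _
    apply PySem.Dict.ext
    rw [PySem.Dict.items_eq_map_keys _ hndP (0 : Int),
      PySem.Dict.items_eq_map_keys _ hnde (0 : Int), hkeysP, hke]
    apply List.map_congr_left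
    intro k hk
    have hkS : k ∈ (x :: S') := (PySem.Set.mem_ofList _ _).1 hk
    have hkk : k ∈ votes.items.map Prod.fst := by
      rw [← hkeysdef, hkd, PySem.Set.mem_ofList]; exact hkS
    obtain ⟨p, hpmem, hp1⟩ := List.mem_map.1 hkk
    have hpk : (k, p.2) ∈ votes.items := by rw [← hp1, Prod.mk.eta]; exact hpmem
    have hPg : (pvPositional votes (pvVals (x :: S').length)).get? k
        = some (pvDot p.2 (pvVals (x :: S').length)) := by
      unfold pvPositional
      exact pv_get?_fold_insert_mem votes.items (fun q => pvDot q.2 (pvVals (x :: S').length))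
        _ k p.2 (hkeysdef ▸ hndv) hpk
    have hvg : votes.getD k [] = p.2 := by
      rw [PySem.Dict.getD, PySem.Dict.get?_of_mem_items votes hpk hndv, Option.getD_some]
    have : (pvPositional votes (pvVals (x :: S').length)).getD k 0 = e.getD k 0 := by
      rw [PySem.Dict.getD, hPg, Option.getD_some, hdot k, hvg]
    rw [this]

theorem pv_remove?_spec (xs : List String) (a : String) (h : a ∈ xs) :
    ∃ ys, PySem.List.remove? xs a = some ys ∧ ys.length + 1 = xs.length ∧ ∀ x ∈ ys, x ∈ xs := by
  simp only [PySem.List.remove?]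
  obtain ⟨i, hi⟩ := Option.isSome_iff_exists.1 (List.isSome_idxOf?.mpr h)
  have hlt : i < xs.length := (List.idxOf?_eq_some_iff.1 hi).1
  refine ⟨xs.eraseIdx i, by simp [hi], ?_, fun x hx => List.mem_of_mem_eraseIdx hx⟩
  rw [List.length_eraseIdx]
  simp [hlt]
  omega

theorem pv_outer (variants : List String) (items : List (String × Int)) (K : Nat)
    (hKV : K ≤ variants.length)
    (hb : ∀ p ∈ items,
      K ≤ 1 ∨ (pvFilt variants p.1).Nodup ∨
      (pvFilt variants p.1).length + K ≤ variants.length + 2) :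
    ∀ (L : List Int) (rA S : List String),
    (∀ x ∈ S, x ∈ variants) → S.length ≤ variants.length →
    S.length + K = variants.length + 1 + L.length →
    (L.foldl
      (fun (st : List String × List String) _ =>
        let sc := pvRoundScore (items.map (fun p => (PySem.Str.split₀ p.1, p.2))) st.2
        match PySem.List.min? sc.keys (fun k => sc.getD k 0) with
        | some w => (w :: st.1, (PySem.List.remove? st.2 w).getD st.2)
        | none => st)
      (rA.reverse, S)) =
    (((L.foldl
      (fun (st : List String × List String) _ =>
        let bs := pvBorda (pvScores items st.2)
        match PySem.List.min? bs.keys (fun k => bs.getD k 0) with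
        | some m => (st.1 ++ [m], (PySem.List.remove? st.2 m).getD st.2)
        | none => st)
      (rA, S)).1).reverse,
     ((L.foldl
      (fun (st : List String × List String) _ =>
        let bs := pvBorda (pvScores items st.2)
        match PySem.List.min? bs.keys (fun k => bs.getD k 0) with
        | some m => (st.1 ++ [m], (PySem.List.remove? st.2 m).getD st.2)
        | none => st)
      (rA, S)).2)) := by
  intro L
  induction L with
  | nil => intro rA S _ _ _; simp
  | cons z L ih =>
    intro rA S hSsub hSle harith
    -- per-round ballot bound
    have hround : ∀ p ∈ items,
        ((PySem.Str.split₀ p.1).filter (fun t => decide (t ∈ S))).length ≤ S.length := by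
      intro p hp
      have hsubl : List.Sublist ((PySem.Str.split₀ p.1).filter (fun t => decide (t ∈ S)))
          (pvFilt variants p.1) := by
        apply List.monotone_filter_right
        intro a ha
        simp only [decide_eq_true_eq] at *
        exact hSsub a ha
      simp only [List.length_cons] at harith
      rcases hb p hp with h1 | h2 | h3
      · omega
      · have hnd : ((PySem.Str.split₀ p.1).filter (fun t => decide (t ∈ S))).Nodup :=
          h2.sublist hsubl
        have hsubS : (PySem.Str.split₀ p.1).filter (fun t => decide (t ∈ S)) ⊆ S := by
          intro a ha
          have := List.of_mem_filter ha
          simpa using this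
        exact (hnd.subperm hsubS).length_le
      · have := hsubl.length_le
        omega
    have hSne : S ≠ [] := by
      intro h; rw [h] at harith; simp at harith; omega
    have heq := pv_round_eq S items hround
    have hkeys := pv_keys_roundScore S items hround
    rw [List.foldl_cons, List.foldl_cons]
    simp only [← heq]
    set bs := pvBorda (pvScores items S) with hbs
    cases hmin : PySem.List.min? bs.keys (fun k => bs.getD k 0) with
    | none =>
      exfalso
      have : bs.keys = [] := (PySem.List.min?_eq_none_iff _ _).1 hmin
      rw [heq, hkeys] at this
      obtain ⟨x, S', rfl⟩ := List.exists_cons_of_ne_nil hSne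
      exact List.ne_nil_of_mem ((PySem.Set.mem_ofList _ _).2 List.mem_cons_self) this
    | some w =>
      have hwS : w ∈ S := by
        have := PySem.List.min?_mem hmin
        rw [heq, hkeys, PySem.Set.mem_ofList] at this
        exact this
      obtain ⟨S', hrem, hlen, hsub'⟩ := pv_remove?_spec S w hwS
      simp only [hrem, Option.getD_some]
      have h1 : (w :: rA.reverse) = (rA ++ [w]).reverse := by simp
      rw [h1]
      have harith' : S.length + K = variants.length + 1 + (L.length + 1) := by
        simpa using harith
      exact ih (rA ++ [w]) S' (fun x hx => hSsub x (hsub' x hx)) (by omega) (by omega)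

theorem pv_keys_ofList (l : List (String × Int)) :
    (PySem.Dict.ofList l).keys = PySem.Set.ofList (l.map Prod.fst) := by
  show (l.foldl (fun acc p => acc.insert p.1 p.2) PySem.Dict.empty).keys = _
  rw [PySem.Dict.keys_foldl_insert_key l Prod.fst (fun _ p => p.2) PySem.Dict.empty]
  rw [show (PySem.Dict.empty : PySem.Dict String Int).keys = [] from rfl,
    PySem.Set.update_nil_left]

theorem pv_size_ofList (l : List (String × Int)) :
    (PySem.Dict.ofList l).size = (PySem.Set.ofList (l.map Prod.fst)).length := by
  have h : (PySem.Dict.ofList l).keys.length = (PySem.Set.ofList (l.map Prod.fst)).length := by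
    rw [pv_keys_ofList]
  simpa [PySem.Dict.keys, PySem.Dict.size] using h

theorem pv_pyGet?_zero (xs : List String) : PySem.List.pyGet? xs 0 = xs.head? := by
  cases xs <;> simp [PySem.List.pyGet?, PySem.List.pyIdx?, List.head?_eq_getElem?]

theorem pv_main (lineups : List (String × Int)) (variants : List String)
    (hpre : Pre_baldwin lineups variants) :
    baldwin lineups variants = baldwin_alt lineups variants := by
  obtain ⟨hne, hKV, hb0⟩ := hpre
  unfold baldwin baldwin_alt
  dsimp only
  set d := PySem.Dict.ofList lineups with hd
  set K := d.size with hK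
  have hKs : K = (PySem.Set.ofList (lineups.map Prod.fst)).length := pv_size_ofList lineups
  -- transfer the per-ballot hypothesis from the raw assoc list to the dict's items
  have hb : ∀ p ∈ d.items,
      K ≤ 1 ∨ (pvFilt variants p.1).Nodup ∨
      (pvFilt variants p.1).length + K ≤ variants.length + 2 := by
    intro p hp
    have h1 : p.1 ∈ d.keys := PySem.Dict.mem_keys_of_mem_items d hp
    rw [pv_keys_ofList, PySem.Set.mem_ofList] at h1
    obtain ⟨q, hq, hq1⟩ := List.mem_map.1 h1
    rcases hb0 q hq with h | h | h
    · exact Or.inl (by omega)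
    · exact Or.inr (Or.inl (by rwa [hq1] at h))
    · exact Or.inr (Or.inr (by rw [← hq1]; omega))
  -- the number of elimination rounds
  rcases Nat.eq_zero_or_pos K with hK0 | hKpos
  · rw [hK0]
    norm_num [pv_pyGet?_zero]
  · have hL : PySem.List.pyRange 0 ((K : Int) - 1) 1
        = List.map (fun k : Nat => (↑k : Int)) (List.range (K - 1)) := by
      rw [show ((K : Int) - 1) = ((K - 1 : Nat) : Int) by omega]
      exact PySem.List.pyRange_zero_natCast (K - 1)
    have hlen : (PySem.List.pyRange 0 ((K : Int) - 1) 1).length = K - 1 := by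
      rw [hL]; simp
    have houter := pv_outer variants d.items K (by omega) hb
      (PySem.List.pyRange 0 ((K : Int) - 1) 1) [] variants
      (fun x hx => hx) (le_refl _) (by rw [hlen]; omega)
    rw [List.reverse_nil] at houter
    rw [houter, pv_pyGet?_zero]
    cases hh : ((PySem.List.pyRange 0 ((K : Int) - 1) 1).foldl
      (fun (st : List String × List String) _ =>
        let bs := pvBorda (pvScores d.items st.2)
        match PySem.List.min? bs.keys (fun k => bs.getD k 0) with
        | some m => (st.1 ++ [m], (PySem.List.remove? st.2 m).getD st.2)
        | none => st)
      ([], variants)).2.head? with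
    | none => rfl
    | some v => simp

-- ===== VERDICT (by name: the statement is the Claim_ definition above) =====
theorem baldwin_spec : Claim_equal_baldwin := by
  intro lineups variants _ hpre
  show baldwin lineups variants = baldwin_alt lineups variants
  exact pv_main lineups variants hpre
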